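-- pv_equiv track=rewrite | github.com/FilipPavicic/OtherProjects | IntroductionToArtificialIntelligence/lab3/ID3.py | _maxTupleSecondFirst
-- ===== SOURCE A (Python) =====
-- def _maxTupleSecondFirst(data) -> tuple:
--     max = None
--     for value in data.items():
--         if(max == None or ( value[1] == max[1] and value[0] < max[0])):
--             max = value
--             continue
--         if(max == None or value[1] > max[1]):
--             max = value
--     return max
-- ===== SOURCE B (Python) =====
-- def _maxTupleSecondFirst(data) -> tuple:
--     if not data:
--         return None
--     m = max(data.values())
--     return (min(k for k, v in data.items() if v == m), m)
-- ===== Notes on version B (the rewrite author's own statement) =====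
-- stated objective: simpler
-- what changed: Replaces A's single accumulator loop with a two-pass decomposition: take the maximum value, then the minimum key among items holding it.
-- outside the precondition, e.g. on _maxTupleSecondFirst({}): A returns None, B returns None
import Mathlib
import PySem

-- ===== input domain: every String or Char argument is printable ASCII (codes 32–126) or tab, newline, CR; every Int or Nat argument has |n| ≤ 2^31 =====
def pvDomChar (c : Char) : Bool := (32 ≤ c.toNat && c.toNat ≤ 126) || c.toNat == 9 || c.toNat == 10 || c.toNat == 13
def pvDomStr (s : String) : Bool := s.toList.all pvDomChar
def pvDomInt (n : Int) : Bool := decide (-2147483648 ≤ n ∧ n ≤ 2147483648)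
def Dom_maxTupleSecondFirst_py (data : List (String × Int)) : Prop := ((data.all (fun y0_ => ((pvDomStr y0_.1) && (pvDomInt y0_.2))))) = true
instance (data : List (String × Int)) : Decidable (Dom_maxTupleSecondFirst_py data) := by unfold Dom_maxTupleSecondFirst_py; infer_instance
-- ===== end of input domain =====

-- B replaces A's single accumulator loop with a two-pass decomposition (max value, then min key among its holders); objective: simpler.


-- ===== PORT A =====
-- A's loop body: first `if` takes the item when max is None or it ties the value with a smaller key;
-- the second `if` (max is never None there) takes it when its value is strictly greater.
def pyStepA (mx : Option (String × Int)) (value : String × Int) : Option (String × Int) :=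
  match mx with
  | none => some value
  | some m =>
    if value.2 = m.2 ∧ value.1 < m.1 then some value
    else if value.2 > m.2 then some value
    else some m

def maxTupleSecondFirst_py (data : List (String × Int)) : String × Int :=
  match data.foldl pyStepA none with
  | some m => m
  | none => ("", 0)   -- A returns None here (empty input); excluded by Pre_

-- ===== PORT B =====
def maxTupleSecondFirst_py_alt (data : List (String × Int)) : String × Int :=
  match data with
  | [] => ("", 0)     -- B returns None here; excluded by Pre_
  | x :: rest =>
    let m := (rest.map Prod.snd).foldl max x.2          -- max(data.values())
    match (data.filter (fun p => p.2 == m)).map Prod.fst with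
    | [] => ("", 0)   -- unreachable: the maximum value is attained
    | k :: ks => (ks.foldl min k, m)                    -- min key among items with value m

-- ===== PRECONDITION & SPEC =====
-- Pre_ excludes only the empty dict, on which both Pythons return None, which is not a (str, int) tuple.
def Pre_maxTupleSecondFirst_py (data : List (String × Int)) : Prop := data ≠ []
instance (data : List (String × Int)) : Decidable (Pre_maxTupleSecondFirst_py data) := by
  unfold Pre_maxTupleSecondFirst_py; infer_instance
def pvWitness_maxTupleSecondFirst_py : (List (String × Int)) := [("a", 1), ("b", 2)]

def Spec_maxTupleSecondFirst_py (data : List (String × Int)) (out : String × Int) : Prop :=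
  out = maxTupleSecondFirst_py_alt data
instance (data : List (String × Int)) (out : String × Int) : Decidable (Spec_maxTupleSecondFirst_py data out) := by
  unfold Spec_maxTupleSecondFirst_py; infer_instance

-- ===== CLAIM (what is proved, stated in full; the proofs are below) =====
def Claim_equal_maxTupleSecondFirst_py : Prop :=
  ∀ (data : List (String × Int)), Dom_maxTupleSecondFirst_py data →
    Pre_maxTupleSecondFirst_py data →
    Spec_maxTupleSecondFirst_py data (maxTupleSecondFirst_py data)

-- ===== LEMMAS AND PROOFS =====

-- Canonical property: r is an element of l with maximal value, and its key is minimal among holders.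
def IsBest (l : List (String × Int)) (r : String × Int) : Prop :=
  r ∈ l ∧ (∀ p ∈ l, p.2 ≤ r.2) ∧ (∀ p ∈ l, p.2 = r.2 → r.1 ≤ p.1)

theorem isBest_unique {l : List (String × Int)} {r r' : String × Int}
    (h : IsBest l r) (h' : IsBest l r') : r = r' := by
  obtain ⟨hm, hv, hk⟩ := h
  obtain ⟨hm', hv', hk'⟩ := h'
  have hvv : r.2 = r'.2 := le_antisymm (hv' r hm) (hv r' hm')
  have hkk : r.1 = r'.1 := le_antisymm (hk r' hm' hvv.symm) (hk' r hm hvv)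
  exact Prod.ext hkk hvv

-- generic foldl max / min facts
theorem le_foldl_max {α : Type} [LinearOrder α] (l : List α) (a : α) : a ≤ l.foldl max a := by
  induction l generalizing a with
  | nil => exact le_refl _
  | cons b t ih => exact le_trans (le_max_left a b) (ih (max a b))

theorem mem_le_foldl_max {α : Type} [LinearOrder α] {l : List α} {x : α} (hx : x ∈ l) (a : α) :
    x ≤ l.foldl max a := by
  induction l generalizing a with
  | nil => cases hx
  | cons b t ih =>
    rcases List.mem_cons.mp hx with h | h
    · subst h; exact le_trans (le_max_right a x) (le_foldl_max t _)
    · exact ih h _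
theorem foldl_max_mem {α : Type} [LinearOrder α] (l : List α) (a : α) :
    l.foldl max a = a ∨ l.foldl max a ∈ l := by
  induction l generalizing a with
  | nil => exact Or.inl rfl
  | cons b t ih =>
    rcases ih (max a b) with h | h
    · rcases max_cases a b with ⟨he, _⟩ | ⟨he, _⟩
      · exact Or.inl (show List.foldl max (max a b) t = a from h.trans he)
      · refine Or.inr ?_
        show List.foldl max (max a b) t ∈ b :: t
        rw [h, he]; exact List.mem_cons_self
    · exact Or.inr (List.mem_cons_of_mem _ h)

theorem foldl_min_le_init {α : Type} [LinearOrder α] (l : List α) (a : α) : l.foldl min a ≤ a := by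
  induction l generalizing a with
  | nil => exact le_refl _
  | cons b t ih => exact le_trans (ih (min a b)) (min_le_left a b)

theorem foldl_min_le_mem {α : Type} [LinearOrder α] {l : List α} {x : α} (hx : x ∈ l) (a : α) :
    l.foldl min a ≤ x := by
  induction l generalizing a with
  | nil => cases hx
  | cons b t ih =>
    rcases List.mem_cons.mp hx with h | h
    · subst h; exact le_trans (foldl_min_le_init t _) (min_le_right a x)
    · exact ih h _

theorem foldl_min_mem {α : Type} [LinearOrder α] (l : List α) (a : α) :
    l.foldl min a = a ∨ l.foldl min a ∈ l := by
  induction l generalizing a with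
  | nil => exact Or.inl rfl
  | cons b t ih =>
    rcases ih (min a b) with h | h
    · rcases min_cases a b with ⟨he, _⟩ | ⟨he, _⟩
      · exact Or.inl (show List.foldl min (min a b) t = a from h.trans he)
      · refine Or.inr ?_
        show List.foldl min (min a b) t ∈ b :: t
        rw [h, he]; exact List.mem_cons_self
    · exact Or.inr (List.mem_cons_of_mem _ h)

-- A's fold over `some` never returns to `none` …
theorem foldl_pyStepA_some (l : List (String × Int)) (m : String × Int) :
    ∃ r, l.foldl pyStepA (some m) = some r ∧ IsBest (m :: l) r := by
  induction l generalizing m with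
  | nil =>
    exact ⟨m, rfl, List.mem_cons_self, by simp, by simp⟩
  | cons v t ih =>
    have hred : ∀ (a b : String × Int), pyStepA (some a) b =
        if b.2 = a.2 ∧ b.1 < a.1 then some b else if b.2 > a.2 then some b else some a :=
      fun _ _ => rfl
    have hstep : ∃ s, pyStepA (some m) v = some s ∧ (s = m ∨ s = v) := by
      rw [hred]
      split_ifs with h1 h2
      · exact ⟨v, rfl, Or.inr rfl⟩
      · exact ⟨v, rfl, Or.inr rfl⟩
      · exact ⟨m, rfl, Or.inl rfl⟩
    obtain ⟨s, hs, hcase⟩ := hstep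
    obtain ⟨r, hr, hmem, hval, hkey⟩ := ih s
    refine ⟨r, by simpa [List.foldl, hs] using hr, ?_, ?_, ?_⟩
    · -- membership: s ∈ {m, v}, so r ∈ m :: v :: t
      rcases List.mem_cons.mp hmem with h | h
      · rcases hcase with h' | h' <;> simp [h, h']
      · exact List.mem_cons_of_mem _ (List.mem_cons_of_mem _ h)
    · -- value bound
      intro p hp
      have hsle : s.2 ≤ r.2 := hval s List.mem_cons_self
      have hmax : m.2 ≤ s.2 ∧ v.2 ≤ s.2 := by
        rw [hred] at hs
        split_ifs at hs with h1 h2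
        · cases hs; exact ⟨le_of_eq h1.1.symm, le_refl _⟩
        · cases hs; exact ⟨le_of_lt h2, le_refl _⟩
        · cases hs; exact ⟨le_refl _, le_of_not_gt h2⟩
      rcases List.mem_cons.mp hp with h | h
      · exact h ▸ le_trans hmax.1 hsle
      rcases List.mem_cons.mp h with h' | h'
      · exact h' ▸ le_trans hmax.2 hsle
      · exact hval p (List.mem_cons_of_mem _ h')
    · -- tie-break: minimal key among holders of r.2
      intro p hp hpv
      have hsb := hkey s List.mem_cons_self
      rcases List.mem_cons.mp hp with h | h
      · -- p = m
        subst h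
        rw [hred] at hs
        split_ifs at hs with h1 h2
        · cases hs
          exact le_trans (hsb (h1.1.trans hpv)) (le_of_lt h1.2)
        · -- the new item v has a strictly greater value: r.2 ≥ v.2 > p.2 contradicts p.2 = r.2
          cases hs
          exact absurd (le_trans (hval v List.mem_cons_self) (le_of_eq hpv.symm)) (not_le.mpr h2)
        · cases hs; exact hsb hpv
      rcases List.mem_cons.mp h with h' | h'
      · -- p = v
        subst h'
        rw [hred] at hs
        split_ifs at hs with h1 h2
        · cases hs; exact hsb hpv
        · cases hs; exact hsb hpv
        · -- s = m, v.2 ≤ m.2; with v.2 = r.2 ≥ m.2 we get v.2 = m.2, so ¬h1 gives m.1 ≤ v.1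
          cases hs
          have hm2 : m.2 ≤ r.2 := hval m List.mem_cons_self
          have hmv : p.2 = m.2 := le_antisymm (le_of_not_gt h2) (hpv.symm ▸ hm2)
          have hne : ¬ p.1 < m.1 := fun hlt => h1 ⟨hmv, hlt⟩
          exact le_trans (hsb (hmv.symm.trans hpv)) (le_of_not_gt hne)
      · exact hkey p (List.mem_cons_of_mem _ h') hpv

theorem portA_isBest (x : String × Int) (rest : List (String × Int)) :
    IsBest (x :: rest) (maxTupleSecondFirst_py (x :: rest)) := by
  obtain ⟨r, hr, hb⟩ := foldl_pyStepA_some rest x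
  have : maxTupleSecondFirst_py (x :: rest) = r := by
    unfold maxTupleSecondFirst_py
    simp [List.foldl, pyStepA, hr]
  exact this ▸ hb

theorem portB_isBest (x : String × Int) (rest : List (String × Int)) :
    IsBest (x :: rest) (maxTupleSecondFirst_py_alt (x :: rest)) := by
  set l := x :: rest with hl
  set m := (rest.map Prod.snd).foldl max x.2 with hm
  -- every value is ≤ m, and m is attained by some element of l
  have hub : ∀ p ∈ l, p.2 ≤ m := by
    intro p hp
    rcases List.mem_cons.mp hp with h | h
    · exact h ▸ le_foldl_max _ _
    · exact mem_le_foldl_max (List.mem_map_of_mem h) _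
  have hatt : ∃ p ∈ l, p.2 = m := by
    rcases foldl_max_mem (rest.map Prod.snd) x.2 with h | h
    · exact ⟨x, List.mem_cons_self, h.symm⟩
    · obtain ⟨p, hp, hpv⟩ := List.mem_map.mp h
      exact ⟨p, List.mem_cons_of_mem _ hp, hpv ▸ rfl⟩
  cases hks : (l.filter (fun p => p.2 == m)).map Prod.fst with
  | nil =>
    obtain ⟨p, hp, hpv⟩ := hatt
    have : p.1 ∈ (l.filter (fun p => p.2 == m)).map Prod.fst :=
      List.mem_map_of_mem (List.mem_filter.mpr ⟨hp, by simp [hpv]⟩)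
    rw [hks] at this; cases this
  | cons k ks =>
    have hres : maxTupleSecondFirst_py_alt (x :: rest) = (ks.foldl min k, m) := by
      unfold maxTupleSecondFirst_py_alt
      simp only [← hm, ← hl, hks]
    rw [hres]
    have hminmem : ks.foldl min k ∈ k :: ks := by
      rcases foldl_min_mem ks k with h | h
      · rw [h]; exact List.mem_cons_self
      · exact List.mem_cons_of_mem _ h
    rw [← hks] at hminmem
    obtain ⟨p, hp, hpk⟩ := List.mem_map.mp hminmem
    obtain ⟨hpl, hpv⟩ := List.mem_filter.mp hp
    have hpveq : p.2 = m := by simpa using hpv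
    refine ⟨?_, ?_, ?_⟩
    · have : p = (ks.foldl min k, m) := Prod.ext hpk hpveq
      exact this ▸ hpl
    · intro q hq; exact hub q hq
    · intro q hq hqv
      have hqk : q.1 ∈ (l.filter (fun p => p.2 == m)).map Prod.fst :=
        List.mem_map_of_mem (List.mem_filter.mpr ⟨hq, by simp [hqv]⟩)
      rw [hks] at hqk
      rcases List.mem_cons.mp hqk with h | h
      · exact h ▸ foldl_min_le_init ks k
      · exact foldl_min_le_mem h k

-- ===== VERDICT (by name: the statement is the Claim_ definition above) =====
theorem maxTupleSecondFirst_py_spec : Claim_equal_maxTupleSecondFirst_py := by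
  intro data _ hpre
  unfold Spec_maxTupleSecondFirst_py
  cases data with
  | nil => exact absurd rfl hpre
  | cons x rest => exact isBest_unique (portA_isBest x rest) (portB_isBest x rest)
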